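-- pv_equiv track=rewrite | github.com/AfTermathcy/Two-Stage-Stable-Matching | cut_graph.py | get_school_chains
-- ===== SOURCE A (Python) =====
-- def get_school_chains(A_pref, B_pref, A_quota, st_edges):
--     A = list(A_pref.keys())  # A = ['A0', 'A1', ..., 'A{n-1}']
--     B = list(B_pref.keys())  # B = ['B0', 'B1', ..., 'B{n-1}']
--     chains = {school: [] for school in A}
--     for school in A:
--         chain = []
--         for edge in st_edges:
--             if edge[0] == school:
--                 chain.append(edge)
--
--         sort_order = A_pref[school]
--         chain.sort(key = lambda i: sort_order.index(i[1]))
--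
--         chains[school] = chain
--
--     return chains
-- ===== SOURCE B (Python) =====
-- def get_school_chains(A_pref, B_pref, A_quota, st_edges):
--     # Distribution (counting) sort per school instead of a comparison sort.
--     chains = {}
--     for school, prefs in A_pref.items():
--         buckets = [[] for _ in prefs]
--         for edge in st_edges:
--             if edge[0] == school:
--                 buckets[prefs.index(edge[1])].append(edge)
--         chains[school] = [edge for bucket in buckets for edge in bucket]
--     return chains
-- ===== Notes on version B (the rewrite author's own statement) =====
-- stated objective: alternative
-- what changed: Per school, A collects matching edges and comparison-sorts them with key=prefs.index(edge[1]); B instead does a distribution (bucket) sort: one bucket per preference rank, each matching edge appended to its rank's bucket in a single pass, and the buckets concatenated in rank order, building the chains dict directly instead of pre-initializing it with empty lists.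
import Mathlib
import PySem

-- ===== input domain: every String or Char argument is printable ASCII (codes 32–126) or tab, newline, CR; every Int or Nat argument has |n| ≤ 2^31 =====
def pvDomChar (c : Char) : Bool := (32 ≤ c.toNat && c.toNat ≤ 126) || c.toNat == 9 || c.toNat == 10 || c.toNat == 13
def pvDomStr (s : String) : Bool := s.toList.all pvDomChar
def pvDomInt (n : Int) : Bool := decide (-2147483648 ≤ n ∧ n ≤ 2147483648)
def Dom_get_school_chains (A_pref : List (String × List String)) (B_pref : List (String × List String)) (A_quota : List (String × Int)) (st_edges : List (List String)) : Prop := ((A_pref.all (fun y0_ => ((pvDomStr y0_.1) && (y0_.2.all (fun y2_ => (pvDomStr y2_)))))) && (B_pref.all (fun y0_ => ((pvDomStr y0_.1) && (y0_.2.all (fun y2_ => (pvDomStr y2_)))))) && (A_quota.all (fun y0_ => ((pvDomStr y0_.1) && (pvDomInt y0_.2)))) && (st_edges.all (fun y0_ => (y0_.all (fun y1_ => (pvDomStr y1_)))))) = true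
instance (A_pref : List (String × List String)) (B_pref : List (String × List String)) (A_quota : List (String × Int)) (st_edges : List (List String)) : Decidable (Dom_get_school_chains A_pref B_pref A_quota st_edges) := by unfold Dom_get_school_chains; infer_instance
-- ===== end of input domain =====

-- B replaces A's per-school comparison sort (key = prefs.index(edge[1])) by a distribution
-- (bucket) sort — one bucket per preference rank, filled in one pass over the edges and
-- concatenated in rank order — and builds the chains dict directly instead of
-- pre-initializing it with empty lists.

-- ===== PORT A =====
def get_school_chains (A_pref : List (String × List String)) (B_pref : List (String × List String)) (A_quota : List (String × Int)) (st_edges : List (List String)) : List (String × List (List String)) :=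
  let dA := PySem.Dict.ofList A_pref
  let A := dA.keys
  let _B := (PySem.Dict.ofList B_pref).keys
  let chains : PySem.Dict String (List (List String)) :=
    A.foldl (fun d school => d.insert school []) PySem.Dict.empty
  let chains := A.foldl (fun d school =>
      let chain : List (List String) :=
        st_edges.foldl (fun c edge =>
          -- edge[0]: total form pyGetD; Pre_ keeps the index in range
          if PySem.List.pyGetD edge 0 "" == school then c ++ [edge] else c) []
      -- A_pref[school]: school ∈ keys, so KeyError is impossible; getD is the total form
      let sort_order := dA.getD school []
      -- sort_order.index(i[1]): index? is some under Pre_; .getD 0 is the total form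
      let chain := PySem.List.sorted chain
        (fun i => (PySem.List.index? sort_order (PySem.List.pyGetD i 1 "")).getD 0)
      d.insert school chain) chains
  chains.items

-- ===== PORT B =====
def get_school_chains_alt (A_pref : List (String × List String)) (B_pref : List (String × List String)) (A_quota : List (String × Int)) (st_edges : List (List String)) : List (String × List (List String)) :=
  let chains := (PySem.Dict.ofList A_pref).items.foldl (fun d p =>
      let school := p.1
      let prefs := p.2
      let buckets : List (List (List String)) := prefs.map (fun _ => [])
      let buckets := st_edges.foldl (fun bs edge =>
          if PySem.List.pyGetD edge 0 "" == school then
            -- buckets[j].append(edge): in-place update at j = prefs.index(edge[1])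
            -- (a Nat < len(buckets) under Pre_), ported exactly as List.set / List.getD at j
            let j := (PySem.List.index? prefs (PySem.List.pyGetD edge 1 "")).getD 0
            bs.set j (bs.getD j [] ++ [edge])
          else bs) buckets
      d.insert school buckets.flatten) PySem.Dict.empty
  chains.items

-- ===== PRECONDITION & SPEC =====
-- Pre_ = exactly where Python A returns: unless A_pref is empty (the school loop never runs),
-- every edge must be non-empty (edge[0] raises IndexError), and every edge matching some school
-- must have a second entry (i[1] raises IndexError) that occurs in that school's preference
-- list (else sort_order.index raises ValueError).
def Pre_get_school_chains (A_pref : List (String × List String)) (B_pref : List (String × List String)) (A_quota : List (String × Int)) (st_edges : List (List String)) : Prop :=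
  A_pref = [] ∨ ∀ e ∈ st_edges, e ≠ [] ∧
    ∀ p ∈ (PySem.Dict.ofList A_pref).items, PySem.List.pyGetD e 0 "" = p.1 →
      2 ≤ e.length ∧ PySem.List.pyGetD e 1 "" ∈ p.2
instance (A_pref : List (String × List String)) (B_pref : List (String × List String)) (A_quota : List (String × Int)) (st_edges : List (List String)) : Decidable (Pre_get_school_chains A_pref B_pref A_quota st_edges) := by unfold Pre_get_school_chains; infer_instance

def pvWitness_get_school_chains : (List (String × List String)) × (List (String × List String)) × (List (String × Int)) × List (List String) :=
  ([("A0", ["s1", "s2"]), ("A1", ["s2"])], [("B0", [])], [("A0", 1)], [["A0", "s2"], ["A1", "s2"], ["A0", "s1"], ["X", "s1"]])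

def Spec_get_school_chains (A_pref : List (String × List String)) (B_pref : List (String × List String)) (A_quota : List (String × Int)) (st_edges : List (List String)) (out : List (String × List (List String))) : Prop := out = get_school_chains_alt A_pref B_pref A_quota st_edges
instance (A_pref : List (String × List String)) (B_pref : List (String × List String)) (A_quota : List (String × Int)) (st_edges : List (List String)) (out : List (String × List (List String))) : Decidable (Spec_get_school_chains A_pref B_pref A_quota st_edges out) := by unfold Spec_get_school_chains; infer_instance

-- ===== CLAIM (what is proved, stated in full; the proofs are below) =====
def Claim_equal_get_school_chains : Prop := ∀ (A_pref : List (String × List String)) (B_pref : List (String × List String)) (A_quota : List (String × Int)) (st_edges : List (List String)), Dom_get_school_chains A_pref B_pref A_quota st_edges → Pre_get_school_chains A_pref B_pref A_quota st_edges → Spec_get_school_chains A_pref B_pref A_quota st_edges (get_school_chains A_pref B_pref A_quota st_edges)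

-- ===== LEMMAS AND PROOFS =====

-- bucket j of list l under the rank function r, and the list of all n buckets
def pvFib {α : Type} (r : α → Nat) (l : List α) (j : Nat) : List α := l.filter (fun e => r e == j)
def pvFibs {α : Type} (n : Nat) (r : α → Nat) (l : List α) : List (List α) := (List.range n).map (pvFib r l)

theorem pv_insertBy_partition {α : Type} (key : α → Nat) (x : α) :
    ∀ (l1 l2 : List α), (∀ a ∈ l1, key a ≤ key x) → (∀ b ∈ l2, key x < key b) →
    PySem.List.insertBy (fun a b => decide (key a < key b)) x (l1 ++ l2) = l1 ++ x :: l2 := by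
  intro l1
  induction l1 with
  | nil =>
    intro l2 _ h2
    cases l2 with
    | nil => rfl
    | cons b bs =>
      simp only [List.nil_append, PySem.List.insertBy]
      rw [if_pos (by simpa using h2 b (by simp))]
  | cons a l1 ih =>
    intro l2 h1 h2
    simp only [List.cons_append, PySem.List.insertBy]
    rw [if_neg (by simp; exact h1 a (by simp)), ih l2 (fun a ha => h1 a (by simp [ha])) h2]

theorem pv_rank_mem_flatten_fibs_le {α : Type} (r : α → Nat) (l : List α) (k : Nat) :
    ∀ a ∈ ((List.range (k+1)).map (pvFib r l)).flatten, r a ≤ k := by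
  intro a ha
  simp only [List.mem_flatten, List.mem_map, List.mem_range] at ha
  obtain ⟨b, ⟨j, hj, rfl⟩, hab⟩ := ha
  have := List.of_mem_filter hab
  simp only [beq_iff_eq] at this
  omega

theorem pv_fib_append_single {α : Type} (r : α → Nat) (l : List α) (x : α) (j : Nat) :
    pvFib r (l ++ [x]) j = pvFib r l j ++ if r x == j then [x] else [] := by
  simp only [pvFib, List.filter_append, List.filter_singleton]
  cases h : r x == j <;> simp [h]

theorem pv_fibs_split {α : Type} (n k : Nat) (r : α → Nat) (l' : List α) :
    n = (k+1) + (n-k-1) →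
    (pvFibs n r l').flatten
      = ((List.range (k+1)).map (pvFib r l')).flatten
        ++ ((List.range (n-k-1)).map (fun j => pvFib r l' (k+1+j))).flatten := by
  intro hn
  unfold pvFibs
  conv_lhs => rw [hn]
  rw [List.range_add, List.map_append, List.flatten_append, List.map_map]
  rfl

theorem pv_sorted_eq_flatten_fibs {α : Type} (n : Nat) (r : α → Nat) :
    ∀ l : List α, (∀ e ∈ l, r e < n) →
    PySem.List.sorted l r = (pvFibs n r l).flatten := by
  intro l
  induction l using List.reverseRecOn with
  | nil =>
    intro _
    have : (pvFibs n r ([] : List α)).flatten = [] := by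
      simp [pvFibs, pvFib, List.flatten_eq_nil_iff]
    rw [this]; rfl
  | append_singleton l x ih =>
    intro h
    have hk : r x < n := h x (by simp)
    have hl : ∀ e ∈ l, r e < n := fun e he => h e (by simp [he])
    rw [PySem.List.sorted_eq_foldl_insertBy, List.foldl_append, ← PySem.List.sorted_eq_foldl_insertBy,
        ih hl]
    have hn : n = (r x + 1) + (n - r x - 1) := by omega
    rw [pv_fibs_split n (r x) r l hn, pv_fibs_split n (r x) r (l ++ [x]) hn]
    simp only [List.foldl_cons, List.foldl_nil]
    rw [pv_insertBy_partition r x _ _ (pv_rank_mem_flatten_fibs_le r l (r x))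
      (by
        intro b hb
        simp only [List.mem_flatten, List.mem_map, List.mem_range] at hb
        obtain ⟨c, ⟨j, hj, rfl⟩, hbc⟩ := hb
        have := List.of_mem_filter hbc
        simp only [beq_iff_eq] at this
        omega)]
    have hhigh : (List.range (n - r x - 1)).map (fun j => pvFib r (l ++ [x]) (r x + 1 + j))
        = (List.range (n - r x - 1)).map (fun j => pvFib r l (r x + 1 + j)) := by
      apply List.map_congr_left
      intro j _
      rw [pv_fib_append_single, if_neg (by simp; omega)]
      simp
    have hlow : ((List.range (r x + 1)).map (pvFib r (l ++ [x]))).flatten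
        = ((List.range (r x + 1)).map (pvFib r l)).flatten ++ [x] := by
      rw [List.range_succ, List.map_append, List.map_append, List.flatten_append, List.flatten_append]
      have : (List.range (r x)).map (pvFib r (l ++ [x])) = (List.range (r x)).map (pvFib r l) := by
        apply List.map_congr_left
        intro j hj
        simp only [List.mem_range] at hj
        rw [pv_fib_append_single, if_neg (by simp; omega)]
        simp
      rw [this]
      simp only [List.map_cons, List.map_nil, List.flatten_cons, List.flatten_nil]
      rw [pv_fib_append_single, if_pos (by simp)]
      simp [List.append_assoc]
    rw [hhigh, hlow]
    simp [List.append_assoc]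

theorem pv_foldl_set_eq_fibs {α : Type} (n : Nat) (r : α → Nat) :
    ∀ l : List α, (∀ e ∈ l, r e < n) →
    l.foldl (fun bs e => bs.set (r e) (bs.getD (r e) [] ++ [e])) (pvFibs n r []) = pvFibs n r l := by
  intro l
  induction l using List.reverseRecOn with
  | nil => intro _; rfl
  | append_singleton l x ih =>
    intro h
    have hk : r x < n := h x (by simp)
    have hl : ∀ e ∈ l, r e < n := fun e he => h e (by simp [he])
    rw [List.foldl_append, ih hl]
    simp only [List.foldl_cons, List.foldl_nil]
    have hgetD : (pvFibs n r l).getD (r x) [] = pvFib r l (r x) := by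
      simp [pvFibs, List.getD_eq_getElem?_getD, hk]
    rw [hgetD]
    apply List.ext_getElem
    · simp [pvFibs]
    · intro i h1 h2
      simp only [pvFibs, List.length_set, List.length_map, List.length_range] at h1 h2
      rw [List.getElem_set]
      by_cases hik : r x = i
      · subst hik
        simp only [if_pos rfl, pvFibs, List.getElem_map, List.getElem_range]
        rw [pv_fib_append_single]
        simp
      · rw [if_neg hik]
        simp only [pvFibs, List.getElem_map, List.getElem_range]
        rw [pv_fib_append_single, if_neg (by simp; omega)]
        simp

theorem pv_rank_lt (prefs : List String) (e : List String)
    (h : PySem.List.pyGetD e 1 "" ∈ prefs) :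
    (PySem.List.index? prefs (PySem.List.pyGetD e 1 "")).getD 0 < prefs.length := by
  have hs : (PySem.List.index? prefs (PySem.List.pyGetD e 1 "")).isSome := by
    rw [PySem.List.index?_isSome_iff]; exact h
  obtain ⟨k, hk⟩ := Option.isSome_iff_exists.mp hs
  obtain ⟨hlt, _, _⟩ := PySem.List.getElem_of_index?_eq_some hk
  rw [hk]
  simpa using hlt

-- the per-school core: A's stable comparison sort by rank = B's bucket scatter + concatenation
theorem pv_chain_eq (prefs : List String) (st_edges : List (List String)) (school : String)
    (h : ∀ e ∈ st_edges, (PySem.List.pyGetD e 0 "" == school) = true → PySem.List.pyGetD e 1 "" ∈ prefs) :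
    PySem.List.sorted
      (st_edges.foldl (fun c edge => if PySem.List.pyGetD edge 0 "" == school then c ++ [edge] else c) [])
      (fun i => (PySem.List.index? prefs (PySem.List.pyGetD i 1 "")).getD 0)
    = (st_edges.foldl (fun bs edge =>
        if PySem.List.pyGetD edge 0 "" == school then
          let j := (PySem.List.index? prefs (PySem.List.pyGetD edge 1 "")).getD 0
          bs.set j (bs.getD j [] ++ [edge])
        else bs) (prefs.map (fun _ => ([] : List (List String))))).flatten := by
  have hinit : prefs.map (fun _ => ([] : List (List String)))
      = pvFibs prefs.length (fun i => (PySem.List.index? prefs (PySem.List.pyGetD i 1 "")).getD 0) [] := by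
    apply List.ext_getElem
    · simp [pvFibs]
    · intro i h1 h2
      simp [pvFibs, pvFib]
  rw [PySem.List.foldl_append_if_eq_filter, List.nil_append,
      PySem.List.foldl_if_eq_foldl_filter (fun edge => PySem.List.pyGetD edge 0 "" == school)
        (fun (bs : List (List (List String))) (edge : List String) =>
          let j := (PySem.List.index? prefs (PySem.List.pyGetD edge 1 "")).getD 0
          bs.set j (bs.getD j [] ++ [edge])), hinit]
  have hrank : ∀ e ∈ st_edges.filter (fun edge => PySem.List.pyGetD edge 0 "" == school),
      (PySem.List.index? prefs (PySem.List.pyGetD e 1 "")).getD 0 < prefs.length := by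
    intro e he
    rw [List.mem_filter] at he
    exact pv_rank_lt prefs e (h e he.1 he.2)
  rw [pv_sorted_eq_flatten_fibs prefs.length _ _ hrank,
      ← pv_foldl_set_eq_fibs prefs.length _ _ hrank]

-- re-inserting each existing key of a dict in key order replaces the values in place
theorem pv_items_foldl_insert_replace {ν : Type} (F : String → ν) :
    ∀ (ks : List String) (pre : List (String × ν)) (g : String → ν),
    (pre.map Prod.fst ++ ks).Nodup →
    (ks.foldl (fun d s => d.insert s (F s)) (PySem.Dict.mk (pre ++ ks.map (fun s => (s, g s))))).items
      = pre ++ ks.map (fun s => (s, F s)) := by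
  intro ks
  induction ks with
  | nil => intro pre g _; simp
  | cons s rest ih =>
    intro pre g hnd
    have hs_pre : s ∉ pre.map Prod.fst := by
      intro hm
      exact (List.disjoint_of_nodup_append hnd) hm (by simp)
    have hs_rest : s ∉ rest := by
      have := (List.nodup_append.mp hnd).2.1
      simp only [List.nodup_cons] at this
      exact this.1
    simp only [List.map_cons, List.foldl_cons]
    have hcont : (PySem.Dict.mk (pre ++ (s, g s) :: rest.map (fun s' => (s', g s')))).contains s = true := by
      rw [PySem.Dict.contains_iff_mem_keys]
      simp [PySem.Dict.keys]
    have hins : (PySem.Dict.mk (pre ++ (s, g s) :: rest.map (fun s' => (s', g s')))).insert s (F s)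
        = PySem.Dict.mk ((pre ++ [(s, F s)]) ++ rest.map (fun s' => (s', g s'))) := by
      apply PySem.Dict.ext
      rw [PySem.Dict.items_insert_of_contains _ _ hcont]
      show (pre ++ (s, g s) :: rest.map (fun s' => (s', g s'))).map
          (fun p => if p.1 == s then (s, F s) else p) = _
      rw [List.map_append, List.map_cons]
      have h1 : pre.map (fun p => if p.1 == s then (s, F s) else p) = pre := by
        have h0 : pre.map (fun p => if p.1 == s then (s, F s) else p) = pre.map id := by
          apply List.map_congr_left
          intro p hp
          have hne : p.1 ≠ s := fun hps => hs_pre (hps ▸ List.mem_map_of_mem (f := Prod.fst) hp)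
          simp [hne]
        rw [h0, List.map_id]
      have h2 : (rest.map (fun s' => (s', g s'))).map (fun p => if p.1 == s then (s, F s) else p)
          = rest.map (fun s' => (s', g s')) := by
        rw [List.map_map]
        apply List.map_congr_left
        intro s' hs'
        have hne : s' ≠ s := fun heq => hs_rest (heq ▸ hs')
        simp only [Function.comp_apply]
        rw [if_neg (by simp [hne])]
      rw [h1, h2]
      simp
    rw [hins]
    have hnd' : ((pre ++ [(s, F s)]).map Prod.fst ++ rest).Nodup := by
      have he : (pre ++ [(s, F s)]).map Prod.fst ++ rest = pre.map Prod.fst ++ s :: rest := by simp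
      rw [he]; exact hnd
    rw [ih (pre ++ [(s, F s)]) g hnd']
    simp

-- A's chain for one school (sort_order already looked up) and B's chain for one items pair
def pvChainA (A_pref : List (String × List String)) (st_edges : List (List String)) (school : String) : List (List String) :=
  PySem.List.sorted
    (st_edges.foldl (fun c edge => if PySem.List.pyGetD edge 0 "" == school then c ++ [edge] else c) [])
    (fun i => (PySem.List.index? ((PySem.Dict.ofList A_pref).getD school []) (PySem.List.pyGetD i 1 "")).getD 0)

def pvChainB (st_edges : List (List String)) (school : String) (prefs : List String) : List (List String) :=
  (st_edges.foldl (fun bs edge =>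
      if PySem.List.pyGetD edge 0 "" == school then
        let j := (PySem.List.index? prefs (PySem.List.pyGetD edge 1 "")).getD 0
        bs.set j (bs.getD j [] ++ [edge])
      else bs) (prefs.map (fun _ => []))).flatten

theorem pv_main (A_pref B_pref : List (String × List String)) (A_quota : List (String × Int)) (st_edges : List (List String))
    (hpre : A_pref = [] ∨ ∀ e ∈ st_edges, e ≠ [] ∧
      ∀ p ∈ (PySem.Dict.ofList A_pref).items, PySem.List.pyGetD e 0 "" = p.1 →
        2 ≤ e.length ∧ PySem.List.pyGetD e 1 "" ∈ p.2) :
    get_school_chains A_pref B_pref A_quota st_edges = get_school_chains_alt A_pref B_pref A_quota st_edges := by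
  rcases hpre with hnil | hpre
  · subst hnil; rfl
  · have hnodup : (PySem.Dict.ofList A_pref).keys.Nodup := PySem.Dict.nodup_keys_ofList A_pref
    have hA : get_school_chains A_pref B_pref A_quota st_edges
        = (PySem.Dict.ofList A_pref).keys.map (fun s => (s, pvChainA A_pref st_edges s)) := by
      show ((PySem.Dict.ofList A_pref).keys.foldl
          (fun d school => d.insert school (pvChainA A_pref st_edges school))
          ((PySem.Dict.ofList A_pref).keys.foldl
            (fun d school => d.insert school ([] : List (List String))) PySem.Dict.empty)).items = _
      have h0 : ((PySem.Dict.ofList A_pref).keys.foldl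
          (fun d school => d.insert school ([] : List (List String))) PySem.Dict.empty)
          = PySem.Dict.mk ([] ++ (PySem.Dict.ofList A_pref).keys.map
              (fun s => (s, ([] : List (List String))))) := by
        apply PySem.Dict.ext
        have h := PySem.Dict.items_foldl_insert_fresh (PySem.Dict.ofList A_pref).keys (fun s => s)
          (fun _ => ([] : List (List String))) PySem.Dict.empty (fun a _ => by simp)
          (by simpa using hnodup)
        simpa using h
      rw [h0]
      have h1 := pv_items_foldl_insert_replace (pvChainA A_pref st_edges)
        (PySem.Dict.ofList A_pref).keys [] (fun _ => ([] : List (List String)))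
        (by simpa using hnodup)
      exact h1.trans (by simp)
    have hB : get_school_chains_alt A_pref B_pref A_quota st_edges
        = (PySem.Dict.ofList A_pref).items.map (fun p => (p.1, pvChainB st_edges p.1 p.2)) := by
      show ((PySem.Dict.ofList A_pref).items.foldl
          (fun d p => d.insert p.1 (pvChainB st_edges p.1 p.2)) PySem.Dict.empty).items = _
      have h := PySem.Dict.items_foldl_insert_fresh (PySem.Dict.ofList A_pref).items Prod.fst
        (fun p => pvChainB st_edges p.1 p.2) PySem.Dict.empty (fun a _ => by simp)
        (by exact hnodup)
      simpa using h
    rw [hA, hB]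
    have hkeys : (PySem.Dict.ofList A_pref).keys = (PySem.Dict.ofList A_pref).items.map Prod.fst := rfl
    rw [hkeys, List.map_map]
    apply List.map_congr_left
    intro p hp
    simp only [Function.comp_apply]
    have hgetD : (PySem.Dict.ofList A_pref).getD p.1 [] = p.2 :=
      PySem.Dict.getD_of_mem_items _ (by exact hp) hnodup []
    have hch : pvChainA A_pref st_edges p.1 = pvChainB st_edges p.1 p.2 := by
      unfold pvChainA pvChainB
      rw [hgetD]
      exact pv_chain_eq p.2 st_edges p.1
        (fun e he hbeq => ((hpre e he).2 p hp (by exact eq_of_beq hbeq)).2)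
    rw [hch]

-- ===== VERDICT (by name: the statement is the Claim_ definition above) =====
theorem get_school_chains_spec : Claim_equal_get_school_chains :=
  fun A_pref B_pref A_quota st_edges _ hpre => pv_main A_pref B_pref A_quota st_edges hpre
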